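-- pv_equiv track=rewrite | github.com/s0nik42/lotus-farcaster | lotus-exporter-farcaster/lotus-exporter-farcaster.py | bitfield_to_dict
-- ===== SOURCE A (Python) =====
-- def bitfield_to_dict(bitfield, state, target=None):
--     """Return target enrich by the state of sectors based on a Goland Bitfield deadline"""
--
--     target = target or {}
--
--     # index
--     sector_id = 0
--
--     # number of bit to 1 in the bitfield (number of sectors)
--     count = 0
--
--     # If the bitfield is <2 is contains no sectors
--     if len(bitfield) < 2:
--         return target, count
--
--     # parse the bitfield 2 by 2
--     for i in range(0, len(bitfield), 2):
--         sector_id += bitfield[i]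
--
--         # Increase the counter of the number of sectors included in the bit
--         count += bitfield[i + 1]
--
--         # for each bit set to 1 at the index
--         for inc in range(0, bitfield[i + 1]):
--
--             # Create the sector in the dictionary of not exist and set the state value to true (ex : target[SECTORID][STATE] = True // target["25"]["Active"] = true
--             if str(sector_id + inc) not in target:
--                 target[str(sector_id + inc)] = {}
--             target[str(sector_id + inc)][state] = True
--
--         # Increment the sector ID
--         sector_id += bitfield[i + 1]
--     return target, count
-- ===== SOURCE B (Python) =====
-- def bitfield_to_dict(bitfield, state, target=None):
--     """Return target enriched with the state of sectors from a Golang bitfield deadline.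
--
--     Different decomposition: a prefix-sum boundary pass first, then each set-run is
--     the half-open range between consecutive boundaries; the count is the sum of the
--     run lengths (odd-indexed entries).  Mutates target in place, like the original.
--     """
--     target = target or {}
--     if len(bitfield) < 2:
--         return target, 0
--     bounds = []
--     acc = 0
--     for v in bitfield:
--         acc += v
--         bounds.append(acc)
--     for k in range(0, len(bounds) - 1, 2):
--         for sid in range(bounds[k], bounds[k + 1]):
--             target.setdefault(str(sid), {})[state] = True
--     return target, sum(bitfield[1::2])
-- ===== Notes on version B (the rewrite author's own statement) =====
-- stated objective: alternative
-- what changed: B first builds a prefix-sum boundary array of the bitfield in a separate pass, then fills each set-run as the range between consecutive boundaries and takes the count as the sum of the odd-indexed entries, instead of A's single loop threading a running sector_id and count through inner range(0, run) offsets.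
import Mathlib
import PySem

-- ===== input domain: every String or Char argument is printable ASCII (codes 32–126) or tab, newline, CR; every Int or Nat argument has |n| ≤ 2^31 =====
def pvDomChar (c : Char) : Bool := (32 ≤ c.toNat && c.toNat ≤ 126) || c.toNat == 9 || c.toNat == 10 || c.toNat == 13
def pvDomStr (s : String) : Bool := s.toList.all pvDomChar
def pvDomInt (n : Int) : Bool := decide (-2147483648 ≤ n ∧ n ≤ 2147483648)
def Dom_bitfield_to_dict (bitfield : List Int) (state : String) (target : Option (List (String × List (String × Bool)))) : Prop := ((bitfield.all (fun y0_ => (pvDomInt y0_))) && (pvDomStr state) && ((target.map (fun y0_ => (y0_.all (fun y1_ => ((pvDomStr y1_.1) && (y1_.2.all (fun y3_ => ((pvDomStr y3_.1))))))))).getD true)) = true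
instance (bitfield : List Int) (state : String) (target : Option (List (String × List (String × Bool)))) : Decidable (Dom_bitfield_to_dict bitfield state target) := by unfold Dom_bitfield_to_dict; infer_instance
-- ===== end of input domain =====

-- B replaces A's single loop (running sector_id + inline count) by a prefix-sum boundary pass,
-- run-by-run range fills between consecutive boundaries, and a separate sum for the count
-- (objective: alternative decomposition, same cost).  Both A and B mutate `target` in place in
-- Python; the equivalence proved here is about the RETURN value.

-- ===== PORT A =====
def bitfield_to_dict (bitfield : List Int) (state : String) (target : Option (List (String × List (String × Bool)))) : (List (String × List (String × Bool))) × Int :=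
  -- target = target or {}
  let target0 : List (String × List (String × Bool)) :=
    match target with
    | none => []
    | some t => if t.isEmpty then [] else t
  -- if len(bitfield) < 2: return target, 0
  if bitfield.length < 2 then
    (target0, 0)
  else
    -- for i in range(0, len(bitfield), 2): … with state (target, sector_id, count)
    let res :=
      (PySem.List.pyRange 0 (bitfield.length : Int) 2).foldl
        (fun (st : PySem.Dict String (List (String × Bool)) × Int × Int) i =>
          let sector_id := st.2.1 + PySem.List.pyGetD bitfield i 0
          let count := st.2.2 + PySem.List.pyGetD bitfield (i + 1) 0
          let t :=
            (PySem.List.pyRange 0 (PySem.List.pyGetD bitfield (i + 1) 0) 1).foldl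
              (fun t inc =>
                let key := PySem.Int.toStr (sector_id + inc)
                -- if str(sector_id + inc) not in target: target[…] = {}
                let t := if PySem.Dict.contains t key then t else PySem.Dict.insert t key []
                -- target[str(sector_id + inc)][state] = True
                PySem.Dict.modify t key []
                  (fun sub => (PySem.Dict.insert (PySem.Dict.mk sub) state true).items))
              st.1
          (t, sector_id + PySem.List.pyGetD bitfield (i + 1) 0, count))
        (PySem.Dict.mk target0, 0, 0)
    ((res.1).items, res.2.2)

-- ===== PORT B =====
def bitfield_to_dict_alt (bitfield : List Int) (state : String) (target : Option (List (String × List (String × Bool)))) : (List (String × List (String × Bool))) × Int :=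
  -- target = target or {}
  let target0 : List (String × List (String × Bool)) :=
    match target with
    | none => []
    | some t => if t.isEmpty then [] else t
  if bitfield.length < 2 then
    (target0, 0)
  else
    -- bounds: the prefix sums of the bitfield
    let bounds :=
      (bitfield.foldl (fun (p : List Int × Int) v => (p.1 ++ [p.2 + v], p.2 + v)) ([], 0)).1
    -- each set-run is range(bounds[k], bounds[k+1]) for even k
    let t :=
      (PySem.List.pyRange 0 ((bounds.length : Int) - 1) 2).foldl
        (fun (t : PySem.Dict String (List (String × Bool))) k =>
          (PySem.List.pyRange (PySem.List.pyGetD bounds k 0) (PySem.List.pyGetD bounds (k + 1) 0) 1).foldl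
            (fun t sid =>
              -- target.setdefault(str(sid), {})[state] = True
              let key := PySem.Int.toStr sid
              PySem.Dict.modify (PySem.Dict.setdefault t key []) key []
                (fun sub => (PySem.Dict.insert (PySem.Dict.mk sub) state true).items))
            t)
        (PySem.Dict.mk target0)
    -- count = sum(bitfield[k + 1] for k in range(0, len(bitfield) - 1, 2))
    (t.items,
      ((PySem.List.pyRange 0 ((bitfield.length : Int) - 1) 2).map
        (fun k => PySem.List.pyGetD bitfield (k + 1) 0)).sum)

-- ===== PRECONDITION & SPEC =====
-- Pre_ excludes odd-length bitfields of length ≥ 3: there A raises IndexError at bitfield[i + 1].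
def Pre_bitfield_to_dict (bitfield : List Int) (state : String) (target : Option (List (String × List (String × Bool)))) : Prop :=
  bitfield.length < 2 ∨ bitfield.length % 2 = 0
instance (bitfield : List Int) (state : String) (target : Option (List (String × List (String × Bool)))) : Decidable (Pre_bitfield_to_dict bitfield state target) := by unfold Pre_bitfield_to_dict; infer_instance

def pvWitness_bitfield_to_dict : List Int × String × (Option (List (String × List (String × Bool)))) :=
  ([2, 3, 1, 2], "Active", none)

def Spec_bitfield_to_dict (bitfield : List Int) (state : String) (target : Option (List (String × List (String × Bool)))) (out : (List (String × List (String × Bool))) × Int) : Prop := out = bitfield_to_dict_alt bitfield state target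
instance (bitfield : List Int) (state : String) (target : Option (List (String × List (String × Bool)))) (out : (List (String × List (String × Bool))) × Int) : Decidable (Spec_bitfield_to_dict bitfield state target out) := by unfold Spec_bitfield_to_dict; infer_instance

-- ===== CLAIM (what is proved, stated in full; the proofs are below) =====
def Claim_equal_bitfield_to_dict : Prop := ∀ (bitfield : List Int) (state : String) (target : Option (List (String × List (String × Bool)))), Dom_bitfield_to_dict bitfield state target → Pre_bitfield_to_dict bitfield state target → Spec_bitfield_to_dict bitfield state target (bitfield_to_dict bitfield state target)

-- ===== LEMMAS AND PROOFS =====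

-- the list of consecutive pairs (bitfield parsed 2 by 2)
def pvPairs : List Int → List (Int × Int)
  | x :: y :: r => (x, y) :: pvPairs r
  | _ => []

-- prefix sums starting from s
def pvScan : List Int → Int → List Int
  | [], _ => []
  | v :: r, s => (s + v) :: pvScan r (s + v)

-- the shared inner dict update, on one key
def pvStep (state : String) (t : PySem.Dict String (List (String × Bool))) (key : String) : PySem.Dict String (List (String × Bool)) :=
  PySem.Dict.modify (if PySem.Dict.contains t key then t else PySem.Dict.insert t key []) key []
    (fun sub => (PySem.Dict.insert (PySem.Dict.mk sub) state true).items)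

lemma pvStep_eq_setdefault (state : String) (t : PySem.Dict String (List (String × Bool))) (key : String) :
    (PySem.Dict.modify (PySem.Dict.setdefault t key []) key []
      (fun sub => (PySem.Dict.insert (PySem.Dict.mk sub) state true).items)) = pvStep state t key := by
  unfold pvStep
  by_cases h : PySem.Dict.contains t key
  · rw [PySem.Dict.setdefault_of_contains t [] h, if_pos h]
  · rw [PySem.Dict.setdefault_of_not_contains t [] (by simpa using h), if_neg h]

def pvFillA (state : String) (t : PySem.Dict String (List (String × Bool))) (a b : Int) : PySem.Dict String (List (String × Bool)) :=
  (PySem.List.pyRange 0 b 1).foldl (fun t inc => pvStep state t (PySem.Int.toStr (a + inc))) t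

def pvFillR (state : String) (t : PySem.Dict String (List (String × Bool))) (a b : Int) : PySem.Dict String (List (String × Bool)) :=
  (PySem.List.pyRange a b 1).foldl (fun t x => pvStep state t (PySem.Int.toStr x)) t

lemma pvFillA_eq_pvFillR (state : String) (t : PySem.Dict String (List (String × Bool))) (a b : Int) :
    pvFillA state t a b = pvFillR state t a (a + b) := by
  unfold pvFillA pvFillR
  rw [PySem.List.pyRange_one 0 b, PySem.List.pyRange_one a (a + b)]
  simp [List.foldl_map]

lemma pvScan_length (l : List Int) (s : Int) : (pvScan l s).length = l.length := by
  induction l generalizing s with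
  | nil => rfl
  | cons v r ih => simp [pvScan, ih]

lemma pvBounds_spec (l : List Int) (acc : List Int) (s : Int) :
    (l.foldl (fun (p : List Int × Int) v => (p.1 ++ [p.2 + v], p.2 + v)) (acc, s)) = (acc ++ pvScan l s, s + l.sum) := by
  induction l generalizing acc s with
  | nil => simp [pvScan]
  | cons v r ih => simp [pvScan, ih, add_assoc]

-- pyRange with stride 2 from 0, even stop
lemma pyRange_stride2 (n : Nat) :
    PySem.List.pyRange 0 ((2 * n : Nat) : Int) 2 = (List.range n).map (fun k => ((2 * k : Nat) : Int)) := by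
  rw [PySem.List.pyRange_of_pos 0 ((2 * n : Nat) : Int) (by norm_num)]
  have h1 : (if (0 : Int) < ((2 * n : Nat) : Int) then ((((2 * n : Nat) : Int) - 0 + 2 - 1) / 2).toNat else 0) = n := by
    rcases Nat.eq_zero_or_pos n with h | h
    · simp [h]
    · rw [if_pos (by exact_mod_cast Nat.mul_pos (by norm_num) h)]
      push_cast; omega
  rw [h1]
  apply List.map_congr_left
  intro k _
  push_cast; ring

-- pyRange with stride 2 from 0, stop = 2n - 1
lemma pyRange_stride2' (n : Nat) :
    PySem.List.pyRange 0 (((2 * n : Nat) : Int) - 1) 2 = (List.range n).map (fun k => ((2 * k : Nat) : Int)) := by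
  rw [PySem.List.pyRange_of_pos 0 (((2 * n : Nat) : Int) - 1) (by norm_num)]
  have h1 : (if (0 : Int) < ((2 * n : Nat) : Int) - 1 then ((((2 * n : Nat) : Int) - 1 - 0 + 2 - 1) / 2).toNat else 0) = n := by
    rcases Nat.eq_zero_or_pos n with h | h
    · simp [h]
    · rw [if_pos (by push_cast; omega)]
      push_cast
      omega
  rw [h1]
  apply List.map_congr_left
  intro k _
  push_cast; ring

-- an even-stride indexed fold over an even-length list is a fold over its pairs
lemma pvFold_stride2 {σ : Type} (n : Nat) (l : List Int) (h : l.length = 2 * n)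
    (f : σ → Int → Int → σ) (init : σ) :
    (List.range n).foldl (fun s k => f s (l.getD (2 * k) 0) (l.getD (2 * k + 1) 0)) init
      = (pvPairs l).foldl (fun s p => f s p.1 p.2) init := by
  induction n generalizing l init with
  | zero =>
    have : l = [] := List.eq_nil_of_length_eq_zero (by omega)
    simp [this, pvPairs]
  | succ m ih =>
    match l, h with
    | x :: y :: r, h =>
      rw [List.range_succ_eq_map]
      simp only [List.foldl_cons, List.foldl_map]
      have hr : r.length = 2 * m := by simp at h; omega
      have hbody : ∀ (s : σ) (k : Nat),
          f s ((x :: y :: r).getD (2 * Nat.succ k) 0) ((x :: y :: r).getD (2 * Nat.succ k + 1) 0)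
            = f s (r.getD (2 * k) 0) (r.getD (2 * k + 1) 0) := by
        intro s k
        have e1 : 2 * Nat.succ k = (2 * k) + 1 + 1 := by omega
        rw [e1]
        simp
      calc (List.range m).foldl
            (fun s k => f s ((x :: y :: r).getD (2 * Nat.succ k) 0) ((x :: y :: r).getD (2 * Nat.succ k + 1) 0))
            (f init ((x :: y :: r).getD 0 0) ((x :: y :: r).getD 1 0))
          = (List.range m).foldl (fun s k => f s (r.getD (2 * k) 0) (r.getD (2 * k + 1) 0)) (f init x y) := by
            apply PySem.List.foldl_congr_mem
            intro s k _
            exact hbody s k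
        _ = (pvPairs r).foldl (fun s p => f s p.1 p.2) (f init x y) := ih r hr (f init x y)
        _ = (pvPairs (x :: y :: r)).foldl (fun s p => f s p.1 p.2) init := by simp [pvPairs]

-- pairs of a prefix-sum list
lemma pvPairs_pvScan (x y : Int) (r : List Int) (s : Int) :
    pvPairs (pvScan (x :: y :: r) s) = (s + x, s + x + y) :: pvPairs (pvScan r (s + x + y)) := by
  simp [pvScan, pvPairs, add_assoc]

-- the main loop correspondence: A's threaded state vs B's boundary fills
lemma pvMain (state : String) (l : List Int) (s cnt : Int) (t : PySem.Dict String (List (String × Bool))) :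
    (pvPairs l).foldl
        (fun (st : PySem.Dict String (List (String × Bool)) × Int × Int) p =>
          (pvFillA state st.1 (st.2.1 + p.1) p.2, st.2.1 + p.1 + p.2, st.2.2 + p.2)) (t, s, cnt)
      = ((pvPairs (pvScan l s)).foldl (fun t p => pvFillR state t p.1 p.2) t,
         s + ((pvPairs l).map (fun p => p.1 + p.2)).sum,
         cnt + ((pvPairs l).map (fun p => p.2)).sum) := by
  induction l using pvPairs.induct generalizing s cnt t with
  | case2 l h =>
    rcases l with _ | ⟨x, _ | ⟨y, r⟩⟩
    · simp [pvPairs, pvScan]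
    · simp [pvPairs, pvScan]
    · exact absurd rfl (h x y r)
  | case1 x y r ih =>
    rw [pvPairs_pvScan]
    simp only [pvPairs, List.foldl_cons, List.map_cons, List.sum_cons]
    rw [ih]
    rw [pvFillA_eq_pvFillR]
    simp only [Prod.mk.injEq]
    exact ⟨trivial, by ring, by ring⟩

-- the two port bodies agree, for any value of `target or {}`
lemma pvPorts_eq (bf : List Int) (st : String) (t0 : List (String × List (String × Bool)))
    (hpre : bf.length < 2 ∨ bf.length % 2 = 0) :
    (if bf.length < 2 then (t0, (0 : Int)) else
      let res :=
        (PySem.List.pyRange 0 (bf.length : Int) 2).foldl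
          (fun (stt : PySem.Dict String (List (String × Bool)) × Int × Int) i =>
            let sector_id := stt.2.1 + PySem.List.pyGetD bf i 0
            let count := stt.2.2 + PySem.List.pyGetD bf (i + 1) 0
            let t :=
              (PySem.List.pyRange 0 (PySem.List.pyGetD bf (i + 1) 0) 1).foldl
                (fun t inc =>
                  let key := PySem.Int.toStr (sector_id + inc)
                  let t := if PySem.Dict.contains t key then t else PySem.Dict.insert t key []
                  PySem.Dict.modify t key []
                    (fun sub => (PySem.Dict.insert (PySem.Dict.mk sub) st true).items))
                stt.1
            (t, sector_id + PySem.List.pyGetD bf (i + 1) 0, count))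
          (PySem.Dict.mk t0, 0, 0)
      ((res.1).items, res.2.2))
    = (if bf.length < 2 then (t0, (0 : Int)) else
      let bounds :=
        (bf.foldl (fun (p : List Int × Int) v => (p.1 ++ [p.2 + v], p.2 + v)) ([], 0)).1
      let t :=
        (PySem.List.pyRange 0 ((bounds.length : Int) - 1) 2).foldl
          (fun (t : PySem.Dict String (List (String × Bool))) k =>
            (PySem.List.pyRange (PySem.List.pyGetD bounds k 0) (PySem.List.pyGetD bounds (k + 1) 0) 1).foldl
              (fun t sid =>
                let key := PySem.Int.toStr sid
                PySem.Dict.modify (PySem.Dict.setdefault t key []) key []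
                  (fun sub => (PySem.Dict.insert (PySem.Dict.mk sub) st true).items))
              t)
          (PySem.Dict.mk t0)
      (t.items,
        ((PySem.List.pyRange 0 ((bf.length : Int) - 1) 2).map
          (fun k => PySem.List.pyGetD bf (k + 1) 0)).sum)) := by
  by_cases hlen : bf.length < 2
  · simp only [if_pos hlen]
  · simp only [if_neg hlen]
    obtain ⟨m, hm⟩ : ∃ m, bf.length = 2 * m := ⟨bf.length / 2, by omega⟩
    have hcast : (bf.length : Int) = ((2 * m : Nat) : Int) := by exact_mod_cast hm
    have hc : ∀ k : Nat, ((2 * k : Nat) : Int) + 1 = ((2 * k + 1 : Nat) : Int) := by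
      intro k; push_cast; ring
    have hsum : ((List.range m).map (fun k => bf.getD (2 * k + 1) 0)).sum
        = ((pvPairs bf).map (fun p => p.2)).sum := by
      have h1 := pvFold_stride2 (σ := Int) m bf hm (fun s _ y => s + y) 0
      simp only [PySem.List.foldl_add] at h1
      simpa using h1
    apply Eq.trans (b := ((((pvPairs (pvScan bf 0)).foldl
        (fun t p => pvFillR st t p.1 p.2) (PySem.Dict.mk t0)).items,
        ((pvPairs bf).map (fun p => p.2)).sum) : (List (String × List (String × Bool))) × Int))
    · -- A side
      have hA := pvFold_stride2 (σ := PySem.Dict String (List (String × Bool)) × Int × Int) m bf hm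
        (fun s x y => (pvFillA st s.1 (s.2.1 + x) y, s.2.1 + x + y, s.2.2 + y)) (PySem.Dict.mk t0, 0, 0)
      rw [hcast, pyRange_stride2, List.foldl_map]
      simp only [hc, PySem.List.pyGetD_natCast]
      have hX := hA.trans (pvMain st bf 0 0 (PySem.Dict.mk t0))
      exact congrArg₂ Prod.mk (congrArg (fun r => r.1.items) hX)
        ((congrArg (fun r => r.2.2) hX).trans (zero_add _))
    · -- B side
      rw [pvBounds_spec bf [] 0]
      simp only [List.nil_append]
      rw [pvScan_length bf 0, hcast, pyRange_stride2', List.foldl_map, List.map_map]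
      simp only [Function.comp_def, hc, PySem.List.pyGetD_natCast, pvStep_eq_setdefault]
      have hB := pvFold_stride2 (σ := PySem.Dict String (List (String × Bool))) m (pvScan bf 0)
        (by rw [pvScan_length]; exact hm) (fun t a b => pvFillR st t a b) (PySem.Dict.mk t0)
      exact congrArg₂ Prod.mk (congrArg PySem.Dict.items hB).symm hsum.symm

-- ===== VERDICT (by name: the statement is the Claim_ definition above) =====
theorem bitfield_to_dict_spec : Claim_equal_bitfield_to_dict := by
  intro bf st tg _ hpre
  unfold Spec_bitfield_to_dict bitfield_to_dict bitfield_to_dict_alt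
  unfold Pre_bitfield_to_dict at hpre
  cases tg with
  | none => exact pvPorts_eq bf st [] hpre
  | some t => exact pvPorts_eq bf st (if t.isEmpty then [] else t) hpre
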